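-- pv_equiv track=rewrite | github.com/XiaotongShen/Data-Structure-and-Algorithm | Zuo/Basic/Class18/Code01_RobotWalk.py | ways3
-- ===== SOURCE A (Python) =====
-- def ways3(n: int, start: int, aim: int, k: int):
--     if n < 2 or start < 1 or start > n or aim < 1 or aim > n or k < 1:
--         return -1
--     dp = [[0] * (k + 1) for i in range(n + 1)]
--     # dp是用来保存动态依赖的依赖表
--     dp[aim][0] = 1  # 在剩余步骤是0的时候，aim位置的值是1
--     for rest in range(1, k + 1):
--         # 遍历每一步的情况
--         # 如果位置在1，依赖2位置rest -1 步的结果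
--         dp[1][rest] = dp[2][rest - 1]
--         # 正常情况下
--         for cur in range(2, n):
--             dp[cur][rest] = dp[cur - 1][rest - 1] + dp[cur + 1][rest - 1]
--         dp[n][rest] = dp[n - 1][rest - 1]
--     return dp[start][k]
-- ===== SOURCE B (Python) =====
-- def ways3(n: int, start: int, aim: int, k: int):
--     if n < 2 or start < 1 or start > n or aim < 1 or aim > n or k < 1:
--         return -1
--     # Reflection principle on the path 1..n: a k-step walk is a free +-1 walk that
--     # never touches 0 or n+1; count = alternating sum of binomials over mirror images.
--     L = n + 1
--     fact = [1] * (k + 1)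
--     for i in range(1, k + 1):
--         fact[i] = fact[i - 1] * i
--
--     def comb(d):
--         # number of +-1 sequences of length k with sum d
--         s = d + k
--         if s % 2 != 0 or s < 0 or s > 2 * k:
--             return 0
--         j = s // 2
--         return fact[k] // (fact[j] * fact[k - j])
--
--     t = k // L + 1
--     total = 0
--     for m in range(-t, t + 1):
--         total += comb(aim - start + 2 * m * L) - comb(aim + start + 2 * m * L)
--     return total
-- ===== Notes on version B (the rewrite author's own statement) =====
-- stated objective: faster
-- what changed: Replaces the O(n*k) dynamic-programming table over all positions and step counts by the reflection principle: the answer is an alternating sum of binomial coefficients C(k,(k+d)/2) over the O(k/n) mirror images of the target modulo 2(n+1), with the binomials read off a factorial table built in one O(k) pass.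
import Mathlib
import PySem

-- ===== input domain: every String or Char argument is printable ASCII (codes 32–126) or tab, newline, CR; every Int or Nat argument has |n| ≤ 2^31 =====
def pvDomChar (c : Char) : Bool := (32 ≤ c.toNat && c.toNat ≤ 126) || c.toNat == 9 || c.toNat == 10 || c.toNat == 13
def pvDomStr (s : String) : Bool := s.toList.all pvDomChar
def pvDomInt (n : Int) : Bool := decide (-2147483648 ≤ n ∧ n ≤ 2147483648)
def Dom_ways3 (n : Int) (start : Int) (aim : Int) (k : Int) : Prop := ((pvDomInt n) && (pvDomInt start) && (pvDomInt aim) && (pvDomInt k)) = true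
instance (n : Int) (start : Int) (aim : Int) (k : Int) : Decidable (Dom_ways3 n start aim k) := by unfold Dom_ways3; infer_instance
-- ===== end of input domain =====

-- B replaces A's O(n*k) dynamic-programming table by the reflection principle: an
-- alternating sum of binomial coefficients over the mirror images of the target,
-- computed from a factorial table (objective: faster).

-- ===== PORT A =====
-- dp is the same list-of-lists as the Python's, read/written with pyGetD/pySetD
def ways3 (n : Int) (start : Int) (aim : Int) (k : Int) : Int :=
  if n < 2 ∨ start < 1 ∨ start > n ∨ aim < 1 ∨ aim > n ∨ k < 1 then -1
  else
    let dp0 := (PySem.List.pyRange 0 (n + 1) 1).map (fun _ => PySem.List.pyRepeat [(0 : Int)] (k + 1))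
    let dp1 := PySem.List.pySetD dp0 aim (PySem.List.pySetD (PySem.List.pyGetD dp0 aim []) 0 1)
    let dp := (PySem.List.pyRange 1 (k + 1) 1).foldl (fun dp rest =>
      let dpa := PySem.List.pySetD dp 1 (PySem.List.pySetD (PySem.List.pyGetD dp 1 []) rest (PySem.List.pyGetD (PySem.List.pyGetD dp 2 []) (rest - 1) 0))
      let dpb := (PySem.List.pyRange 2 n 1).foldl (fun dp cur =>
        PySem.List.pySetD dp cur (PySem.List.pySetD (PySem.List.pyGetD dp cur []) rest
          (PySem.List.pyGetD (PySem.List.pyGetD dp (cur - 1) []) (rest - 1) 0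
            + PySem.List.pyGetD (PySem.List.pyGetD dp (cur + 1) []) (rest - 1) 0))) dpa
      PySem.List.pySetD dpb n (PySem.List.pySetD (PySem.List.pyGetD dpb n []) rest (PySem.List.pyGetD (PySem.List.pyGetD dpb (n - 1) []) (rest - 1) 0))) dp1
    PySem.List.pyGetD (PySem.List.pyGetD dp start []) k 0

-- ===== PORT B =====
-- the fact list is likewise modelled as a total function updated pointwise
def ways3_alt (n : Int) (start : Int) (aim : Int) (k : Int) : Int :=
  if n < 2 ∨ start < 1 ∨ start > n ∨ aim < 1 ∨ aim > n ∨ k < 1 then -1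
  else
    let L := n + 1
    let fact : Int → Int := (PySem.List.pyRange 1 (k+1) 1).foldl
      (fun f i => fun j => if j = i then f (i - 1) * i else f j) (fun _ => 1)
    let comb : Int → Int := fun d =>
      let s := d + k
      if PySem.Int.mod s 2 ≠ 0 ∨ s < 0 ∨ s > 2 * k then 0
      else
        let j := PySem.Int.floordiv s 2
        PySem.Int.floordiv (fact k) (fact j * fact (k - j))
    let t := PySem.Int.floordiv k L + 1
    (PySem.List.pyRange (-t) (t + 1) 1).foldl
      (fun total m => total + (comb (aim - start + 2 * m * L) - comb (aim + start + 2 * m * L))) 0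

-- ===== PRECONDITION & SPEC =====
def Spec_ways3 (n : Int) (start : Int) (aim : Int) (k : Int) (out : Int) : Prop := out = ways3_alt n start aim k
instance (n : Int) (start : Int) (aim : Int) (k : Int) (out : Int) : Decidable (Spec_ways3 n start aim k out) := by unfold Spec_ways3; infer_instance

-- ===== CLAIM (what is proved, stated in full; the proofs are below) =====
def Claim_equal_ways3 : Prop := ∀ (n : Int) (start : Int) (aim : Int) (k : Int), Dom_ways3 n start aim k → Spec_ways3 n start aim k (ways3 n start aim k)

-- ===== LEMMAS AND PROOFS =====

-- number of ±1-step sequences of length r with total displacement d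
def cwalk : Nat → Int → Int
  | 0, d => if d = 0 then 1 else 0
  | r + 1, d => cwalk r (d - 1) + cwalk r (d + 1)

-- number of r-step walks from x to aim staying on the path 1..n
def Wm (n aim : Int) : Nat → Int → Int
  | 0, x => if x = aim then 1 else 0
  | r + 1, x =>
      if x = 1 then Wm n aim r 2
      else if x = n then Wm n aim r (n - 1)
      else if 2 ≤ x ∧ x ≤ n - 1 then Wm n aim r (x - 1) + Wm n aim r (x + 1)
      else 0

-- reflection sum over mirror indices m ∈ [a, b]
def reflSum (n aim : Int) (r : Nat) (x : Int) (a b : Int) : Int :=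
  ((PySem.List.pyRange a (b + 1) 1).map
    (fun m => cwalk r (aim - x + 2 * m * (n + 1)) - cwalk r (aim + x + 2 * m * (n + 1)))).sum

lemma cwalk_eq_zero (r : Nat) (d : Int) (h : d < -(r : Int) ∨ (r : Int) < d) : cwalk r d = 0 := by
  induction r generalizing d with
  | zero => simp only [cwalk]; split <;> omega
  | succ r ih =>
      simp only [cwalk]
      rw [ih (d - 1) (by omega), ih (d + 1) (by omega)]
      ring

lemma sum_map_zero (l : List Int) (f : Int → Int) (h : ∀ m ∈ l, f m = 0) :
    (l.map f).sum = 0 := by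
  induction l with
  | nil => simp
  | cons x l ih => simp [h x (by simp), ih (fun m hm => h m (by simp [hm]))]

lemma sum_extend (f : Int → Int) (a b a' b' : Int) (h1 : a' ≤ a) (hab : a ≤ b + 1)
    (h2 : b ≤ b') (hz : ∀ m, (a' ≤ m ∧ m < a) ∨ (b < m ∧ m ≤ b') → f m = 0) :
    ((PySem.List.pyRange a' (b' + 1) 1).map f).sum = ((PySem.List.pyRange a (b + 1) 1).map f).sum := by
  have hL : ((PySem.List.pyRange a' a 1).map f).sum = 0 := by
    refine sum_map_zero _ f (fun m hm => ?_)
    rcases (PySem.List.mem_pyRange_one).1 hm with ⟨u, v⟩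
    exact hz m (Or.inl ⟨u, v⟩)
  have hR : ((PySem.List.pyRange (b + 1) (b' + 1) 1).map f).sum = 0 := by
    refine sum_map_zero _ f (fun m hm => ?_)
    rcases (PySem.List.mem_pyRange_one).1 hm with ⟨u, v⟩
    exact hz m (Or.inr ⟨by omega, by omega⟩)
  rw [PySem.List.pyRange_one_append a' a (b' + 1) h1 (by omega),
      PySem.List.pyRange_one_append a (b + 1) (b' + 1) hab (by omega),
      List.map_append, List.map_append, List.sum_append, List.sum_append, hL, hR]
  ring

lemma telesum (g : Int → Int) (a b : Int) (hab : a ≤ b + 1) :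
    ((PySem.List.pyRange a (b + 1) 1).map (fun m => g m - g (m + 1))).sum = g a - g (b + 1) := by
  obtain ⟨l, hl⟩ : ∃ l : Nat, b + 1 = a + l := ⟨(b + 1 - a).toNat, by omega⟩
  induction l generalizing b with
  | zero =>
      rw [PySem.List.pyRange_one_eq_nil (by omega)]
      simp only [List.map_nil, List.sum_nil]
      rw [show b + 1 = a from by omega]
      ring
  | succ l ih =>
      have hb : a ≤ b := by omega
      rw [PySem.List.pyRange_one_succ_right hb, List.map_append, List.sum_append]
      have hprev := ih (b - 1) (by omega) (by omega)
      rw [show b - 1 + 1 = b from by ring] at hprev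
      rw [hprev]
      simp only [List.map_cons, List.map_nil, List.sum_cons, List.sum_nil]
      ring

-- sums of pointwise sums split
lemma sum_map_split (l : List Int) (f g : Int → Int) :
    (l.map (fun m => f m + g m)).sum = (l.map f).sum + (l.map g).sum := by
  induction l with
  | nil => simp
  | cons x l ih => simp [ih]; ring

-- Pascal step for the reflection sum
lemma reflSum_step (n aim : Int) (r : Nat) (x a b : Int) :
    reflSum n aim (r + 1) x a b = reflSum n aim r (x - 1) a b + reflSum n aim r (x + 1) a b := by
  unfold reflSum
  rw [← sum_map_split]
  apply congrArg
  apply List.map_congr_left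
  intro m _
  simp only [cwalk]
  have e1 : aim - x + 2 * m * (n + 1) - 1 = aim - (x + 1) + 2 * m * (n + 1) := by ring
  have e2 : aim - x + 2 * m * (n + 1) + 1 = aim - (x - 1) + 2 * m * (n + 1) := by ring
  have e3 : aim + x + 2 * m * (n + 1) - 1 = aim + (x - 1) + 2 * m * (n + 1) := by ring
  have e4 : aim + x + 2 * m * (n + 1) + 1 = aim + (x + 1) + 2 * m * (n + 1) := by ring
  rw [e1, e2, e3, e4]
  ring

-- boundary x = 0
lemma reflSum_zero_left (n aim : Int) (r : Nat) (a b : Int) :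
    reflSum n aim r 0 a b = 0 := by
  unfold reflSum
  apply sum_map_zero
  intro m _
  have e : aim - 0 + 2 * m * (n + 1) = aim + 0 + 2 * m * (n + 1) := by ring
  rw [e]
  ring

-- boundary x = n + 1 (telescoping)
lemma reflSum_zero_right (n aim : Int) (r : Nat) (hn : 2 ≤ n) (ha : 1 ≤ aim) (ha' : aim ≤ n) :
    reflSum n aim r (n + 1) (-((r : Int) + 2)) ((r : Int) + 2) = 0 := by
  unfold reflSum
  have hmap : ∀ m : Int,
      cwalk r (aim - (n + 1) + 2 * m * (n + 1)) - cwalk r (aim + (n + 1) + 2 * m * (n + 1))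
        = (fun m => cwalk r (aim - (n + 1) + 2 * m * (n + 1))) m
          - (fun m => cwalk r (aim - (n + 1) + 2 * m * (n + 1))) (m + 1) := by
    intro m
    have e : aim + (n + 1) + 2 * m * (n + 1) = aim - (n + 1) + 2 * (m + 1) * (n + 1) := by ring
    rw [e]
  calc ((PySem.List.pyRange (-((r : Int) + 2)) ((r : Int) + 2 + 1) 1).map
          (fun m => cwalk r (aim - (n + 1) + 2 * m * (n + 1)) - cwalk r (aim + (n + 1) + 2 * m * (n + 1)))).sum
      = ((PySem.List.pyRange (-((r : Int) + 2)) ((r : Int) + 2 + 1) 1).map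
          (fun m => (fun m => cwalk r (aim - (n + 1) + 2 * m * (n + 1))) m
            - (fun m => cwalk r (aim - (n + 1) + 2 * m * (n + 1))) (m + 1))).sum := by
          apply congrArg; apply List.map_congr_left; intro m _; exact hmap m
    _ = cwalk r (aim - (n + 1) + 2 * (-((r : Int) + 2)) * (n + 1))
          - cwalk r (aim - (n + 1) + 2 * ((r : Int) + 2 + 1) * (n + 1)) := by
          exact telesum _ _ _ (by omega)
    _ = 0 := by
          rw [cwalk_eq_zero r _ (Or.inl (by nlinarith [Int.natCast_nonneg r])),
              cwalk_eq_zero r _ (Or.inr (by nlinarith [Int.natCast_nonneg r]))]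
          ring

-- the reflection sum is independent of the cutoff once the cutoff covers all
-- nonzero terms (2 (n+1) T1 ≥ r suffices)
lemma reflSum_extend (n aim : Int) (r : Nat) (x T1 T2 : Int) (hn : 2 ≤ n)
    (ha : 1 ≤ aim) (ha' : aim ≤ n) (hx : 0 ≤ x) (hx' : x ≤ n + 1)
    (hT1 : (r : Int) ≤ 2 * (n + 1) * T1) (h0 : 0 ≤ T1) (h12 : T1 ≤ T2) :
    reflSum n aim r x (-T2) T2 = reflSum n aim r x (-T1) T1 := by
  unfold reflSum
  apply sum_extend _ (-T1) T1 (-T2) T2 (by omega) (by omega) h12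
  intro m hm
  have hz1 : cwalk r (aim - x + 2 * m * (n + 1)) = 0 := by
    apply cwalk_eq_zero
    rcases hm with ⟨h1, h2⟩ | ⟨h1, h2⟩
    · left; nlinarith
    · right; nlinarith
  have hz2 : cwalk r (aim + x + 2 * m * (n + 1)) = 0 := by
    apply cwalk_eq_zero
    rcases hm with ⟨h1, h2⟩ | ⟨h1, h2⟩
    · left; nlinarith
    · right; nlinarith
  rw [hz1, hz2]
  ring

-- main identity: path-walk counts equal the reflection sum
lemma Wm_eq_reflSum (n aim : Int) (hn : 2 ≤ n) (ha : 1 ≤ aim) (ha' : aim ≤ n) :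
    ∀ (r : Nat) (x : Int), 1 ≤ x → x ≤ n →
      Wm n aim r x = reflSum n aim r x (-((r : Int) + 2)) ((r : Int) + 2) := by
  intro r
  induction r with
  | zero =>
      intro x hx1 hx2
      unfold reflSum
      norm_num
      rw [show PySem.List.pyRange (-2) 3 1 = [-2, -1, 0, 1, 2] from by decide]
      simp only [List.map_cons, List.map_nil, List.sum_cons, List.sum_nil, cwalk, Wm]
      rw [if_neg (show ¬(aim - x + 2 * (-2 : Int) * (n + 1) = 0) from by omega),
          if_neg (show ¬(aim + x + 2 * (-2 : Int) * (n + 1) = 0) from by omega),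
          if_neg (show ¬(aim - x + 2 * (-1 : Int) * (n + 1) = 0) from by omega),
          if_neg (show ¬(aim + x + 2 * (-1 : Int) * (n + 1) = 0) from by omega),
          if_neg (show ¬(aim + x + 2 * (0 : Int) * (n + 1) = 0) from by omega),
          if_neg (show ¬(aim - x + 2 * (1 : Int) * (n + 1) = 0) from by omega),
          if_neg (show ¬(aim + x + 2 * (1 : Int) * (n + 1) = 0) from by omega),
          if_neg (show ¬(aim - x + 2 * (2 : Int) * (n + 1) = 0) from by omega),
          if_neg (show ¬(aim + x + 2 * (2 : Int) * (n + 1) = 0) from by omega)]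
      by_cases hxa : x = aim
      · rw [if_pos hxa, if_pos (show aim - x + 2 * (0 : Int) * (n + 1) = 0 from by omega)]
        ring
      · rw [if_neg hxa, if_neg (show ¬(aim - x + 2 * (0 : Int) * (n + 1) = 0) from by omega)]
        ring
  | succ r ih =>
      intro x hx1 hx2
      have hc1 : -((((r + 1 : Nat)) : Int) + 2) = -(((r : Nat) : Int) + 3) := by push_cast; ring
      have hc2 : ((((r + 1 : Nat)) : Int) + 2) = (((r : Nat) : Int) + 3) := by push_cast; ring
      rw [hc1, hc2, reflSum_step]
      have hext : ∀ y : Int, 0 ≤ y → y ≤ n + 1 →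
          reflSum n aim r y (-(((r : Nat) : Int) + 3)) (((r : Nat) : Int) + 3)
            = reflSum n aim r y (-(((r : Nat) : Int) + 2)) (((r : Nat) : Int) + 2) := by
        intro y hy hy'
        exact reflSum_extend n aim r y ((r : Int) + 2) ((r : Int) + 3) hn ha ha' hy hy'
          (by nlinarith [Int.natCast_nonneg r]) (by positivity) (by omega)
      by_cases h1 : x = 1
      · subst h1
        rw [show (1 : Int) - 1 = 0 from by norm_num, show (1 : Int) + 1 = 2 from by norm_num,
            reflSum_zero_left, hext 2 (by omega) (by omega)]
        simp only [Wm, if_true]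
        rw [ih 2 (by omega) (by omega)]
        ring
      · by_cases h2 : x = n
        · rw [h2, hext (n - 1) (by omega) (by omega), hext (n + 1) (by omega) (by omega),
              reflSum_zero_right n aim r hn ha ha']
          simp only [Wm]
          rw [if_neg (show ¬(n = 1) from by omega)]
          simp only [if_true]
          rw [ih (n - 1) (by omega) (by omega)]
          ring
        · have h3 : 2 ≤ x ∧ x ≤ n - 1 := by omega
          rw [hext (x - 1) (by omega) (by omega), hext (x + 1) (by omega) (by omega)]
          simp only [Wm]
          rw [if_neg h1, if_neg h2, if_pos h3]
          rw [ih (x - 1) (by omega) (by omega), ih (x + 1) (by omega) (by omega)]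

-- ===== A-side: characterisation of the dp fold =====

def Dfun (n aim v : Int) : Int → Int → Int := fun i j =>
  if 1 ≤ i ∧ i ≤ n ∧ 0 ≤ j ∧ j ≤ v then Wm n aim j.toNat i
  else if i = aim ∧ j = 0 then 1 else 0

-- the inner 'for cur in range(2, n)' loop, writing column rest from column rest - 1
lemma inner_fold (n rest : Int) :
    ∀ (a : Int) (d : Int → Int → Int),
      (PySem.List.pyRange a n 1).foldl (fun d cur =>
        fun i j => if i = cur ∧ j = rest then d (cur - 1) (rest - 1) + d (cur + 1) (rest - 1)
                   else d i j) d
      = fun i j => if a ≤ i ∧ i < n ∧ j = rest then d (i - 1) (rest - 1) + d (i + 1) (rest - 1)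
                   else d i j := by
  intro a d
  obtain ⟨l, hl⟩ : ∃ l : Nat, (n - a).toNat = l := ⟨_, rfl⟩
  induction l generalizing a d with
  | zero =>
      rw [PySem.List.pyRange_one_eq_nil (by omega)]
      funext i j
      simp only [List.foldl_nil]
      rw [if_neg (by rintro ⟨u, v, w⟩; omega)]
  | succ l ih =>
      rw [PySem.List.pyRange_one_cons (by omega), List.foldl_cons, ih (a + 1) _ (by omega)]
      funext i j
      by_cases hA : a + 1 ≤ i ∧ i < n ∧ j = rest
      · rw [if_pos hA, if_pos (show a ≤ i ∧ i < n ∧ j = rest from ⟨by omega, hA.2⟩),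
            if_neg (show ¬(i - 1 = a ∧ rest - 1 = rest) from by rintro ⟨_, h⟩; omega),
            if_neg (show ¬(i + 1 = a ∧ rest - 1 = rest) from by rintro ⟨_, h⟩; omega)]
      · rw [if_neg hA]
        by_cases hB : i = a ∧ j = rest
        · obtain ⟨hB1, hB2⟩ := hB
          rw [if_pos ⟨hB1, hB2⟩,
              if_pos (show a ≤ i ∧ i < n ∧ j = rest from ⟨by omega, by omega, hB2⟩), hB1]
        · rw [if_neg hB, if_neg (show ¬(a ≤ i ∧ i < n ∧ j = rest) from by
            rintro ⟨u, v, w⟩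
            rcases (show ¬(a + 1 ≤ i) ∨ ¬(i < n) ∨ ¬(j = rest) from by tauto) with h | h | h
            · exact hB ⟨by omega, w⟩
            · exact h v
            · exact h w)]

-- the outer 'for rest in range(1, k + 1)' loop builds the table of Wm values
lemma outer_fold (n aim : Int) (hn : 2 ≤ n) (ha : 1 ≤ aim) (ha' : aim ≤ n) :
    ∀ v : Nat,
      (PySem.List.pyRange 1 ((v : Int) + 1) 1).foldl (fun dp rest =>
        let dp1 : Int → Int → Int :=
          fun i j => if i = 1 ∧ j = rest then dp 2 (rest - 1) else dp i j
        let dp2 := (PySem.List.pyRange 2 n 1).foldl (fun d cur =>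
          fun i j => if i = cur ∧ j = rest then d (cur - 1) (rest - 1) + d (cur + 1) (rest - 1)
                     else d i j) dp1
        fun i j => if i = n ∧ j = rest then dp2 (n - 1) (rest - 1) else dp2 i j)
        (fun i j => if i = aim ∧ j = 0 then 1 else 0)
      = Dfun n aim (v : Int) := by
  intro v
  induction v with
  | zero =>
      rw [show ((0 : Nat) : Int) + 1 = 1 from by norm_num,
          PySem.List.pyRange_one_eq_nil (a := 1) (b := 1) (by norm_num)]
      funext i j
      simp only [List.foldl_nil, Dfun, Nat.cast_zero]
      by_cases hc : 1 ≤ i ∧ i ≤ n ∧ 0 ≤ j ∧ j ≤ (0 : Int)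
      · rw [if_pos hc, show j = 0 from by omega]
        simp only [Int.toNat_zero, Wm]
        simp
      · rw [if_neg hc]
  | succ v ih =>
      rw [show ((v + 1 : Nat) : Int) = (v : Int) + 1 from by push_cast; ring,
          PySem.List.pyRange_one_succ_right (a := 1) (b := (v : Int) + 1) (by omega),
          List.foldl_append, List.foldl_cons, List.foldl_nil, ih]
      dsimp only
      rw [inner_fold n ((v : Int) + 1)]
      funext i j
      rw [show (v : Int) + 1 - 1 = (v : Int) from by ring]
      beta_reduce
      have hv0 : (0 : Int) ≤ (v : Int) := Int.natCast_nonneg v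
      have hDv : ∀ X : Int, 1 ≤ X → X ≤ n → Dfun n aim (v : Int) X (v : Int) = Wm n aim v X := by
        intro X h1 h2
        unfold Dfun
        rw [if_pos ⟨h1, h2, hv0, le_refl _⟩, Int.toNat_natCast]
      by_cases hj : j = (v : Int) + 1
      · subst hj
        have hRn : Dfun n aim ((v : Int) + 1) i ((v : Int) + 1)
            = if 1 ≤ i ∧ i ≤ n then Wm n aim (v + 1) i else 0 := by
          unfold Dfun
          by_cases hi : 1 ≤ i ∧ i ≤ n
          · rw [if_pos ⟨hi.1, hi.2, by omega, le_refl _⟩, if_pos hi,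
                show ((v : Int) + 1).toNat = v + 1 from by omega]
          · rw [if_neg (show ¬(1 ≤ i ∧ i ≤ n ∧ 0 ≤ (v : Int) + 1 ∧ (v : Int) + 1 ≤ (v : Int) + 1)
                  from by rintro ⟨u, w, _⟩; exact hi ⟨u, w⟩), if_neg hi,
                if_neg (show ¬(i = aim ∧ (v : Int) + 1 = 0) from by rintro ⟨_, h0⟩; omega)]
        rw [hRn]
        by_cases hin : i = n
        · rw [if_pos ⟨hin, rfl⟩, if_neg (show ¬(2 ≤ n - 1 ∧ n - 1 < n ∧ (v : Int) = (v : Int) + 1)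
              from by rintro ⟨_, _, h⟩; omega),
              if_neg (show ¬(n - 1 = 1 ∧ (v : Int) = (v : Int) + 1) from by rintro ⟨_, h⟩; omega),
              hDv (n - 1) (by omega) (by omega), if_pos (show 1 ≤ i ∧ i ≤ n from by omega), hin]
          simp only [Wm]
          simp [show ¬(n = 1) from by omega]
        · rw [if_neg (show ¬(i = n ∧ (v : Int) + 1 = (v : Int) + 1) from by
                rintro ⟨u, _⟩; exact hin u)]
          by_cases hi1 : i = 1
          · rw [if_neg (show ¬(2 ≤ i ∧ i < n ∧ (v : Int) + 1 = (v : Int) + 1) from by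
                  rintro ⟨u, _, _⟩; omega),
                if_pos ⟨hi1, rfl⟩, hDv 2 (by omega) (by omega),
                if_pos (show 1 ≤ i ∧ i ≤ n from by omega), hi1]
            simp only [Wm, if_true]
          · by_cases hmid : 2 ≤ i ∧ i < n
            · rw [if_pos ⟨hmid.1, hmid.2, rfl⟩,
                  if_neg (show ¬(i - 1 = 1 ∧ (v : Int) = (v : Int) + 1) from by rintro ⟨_, h⟩; omega),
                  if_neg (show ¬(i + 1 = 1 ∧ (v : Int) = (v : Int) + 1) from by rintro ⟨_, h⟩; omega),
                  hDv (i - 1) (by omega) (by omega), hDv (i + 1) (by omega) (by omega),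
                  if_pos (show 1 ≤ i ∧ i ≤ n from by omega)]
              simp only [Wm]
              rw [if_neg hi1, if_neg hin, if_pos (show 2 ≤ i ∧ i ≤ n - 1 from by omega)]
            · rw [if_neg (show ¬(2 ≤ i ∧ i < n ∧ (v : Int) + 1 = (v : Int) + 1) from by
                    rintro ⟨u, w, _⟩; exact hmid ⟨u, w⟩),
                  if_neg (show ¬(i = 1 ∧ (v : Int) + 1 = (v : Int) + 1) from by
                    rintro ⟨u, _⟩; exact hi1 u),
                  if_neg (show ¬(1 ≤ i ∧ i ≤ n) from by omega)]
              unfold Dfun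
              rw [if_neg (show ¬(1 ≤ i ∧ i ≤ n ∧ 0 ≤ (v : Int) + 1 ∧ (v : Int) + 1 ≤ (v : Int))
                    from by rintro ⟨_, _, _, h⟩; omega),
                  if_neg (show ¬(i = aim ∧ (v : Int) + 1 = 0) from by rintro ⟨_, h⟩; omega)]
      · rw [if_neg (show ¬(i = n ∧ j = (v : Int) + 1) from by rintro ⟨_, h⟩; exact hj h),
            if_neg (show ¬(2 ≤ i ∧ i < n ∧ j = (v : Int) + 1) from by rintro ⟨_, _, h⟩; exact hj h),
            if_neg (show ¬(i = 1 ∧ j = (v : Int) + 1) from by rintro ⟨_, h⟩; exact hj h)]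
        unfold Dfun
        by_cases hc : 1 ≤ i ∧ i ≤ n ∧ 0 ≤ j ∧ j ≤ (v : Int)
        · rw [if_pos hc, if_pos ⟨hc.1, hc.2.1, hc.2.2.1, by omega⟩]
        · rw [if_neg hc, if_neg (show ¬(1 ≤ i ∧ i ≤ n ∧ 0 ≤ j ∧ j ≤ (v : Int) + 1) from by
              rintro ⟨u, w, y, z⟩; exact hc ⟨u, w, y, by omega⟩)]

-- dp encodes a value table f on indices [0,n] x [0,k]
def Enc (n k : Int) (f : Int → Int → Int) (dp : List (List Int)) : Prop :=
  dp.length = (n + 1).toNat ∧ (∀ row ∈ dp, row.length = (k + 1).toNat) ∧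
  (∀ i j : Int, 0 ≤ i → i ≤ n → 0 ≤ j → j ≤ k → PySem.List.pyGetD (PySem.List.pyGetD dp i []) j 0 = f i j)

lemma Enc_congr (n k : Int) (f g : Int → Int → Int) (dp : List (List Int))
    (h : ∀ i j, f i j = g i j) (hE : Enc n k f dp) : Enc n k g dp :=
  ⟨hE.1, hE.2.1, fun i j h1 h2 h3 h4 => (hE.2.2 i j h1 h2 h3 h4).trans (h i j)⟩

lemma pyGetD_pySetD_int {α : Type} (xs : List α) (a i : Int) (v d : α)
    (ha : 0 ≤ a) (ha' : a < (xs.length : Int)) (hi : 0 ≤ i) (hi' : i < (xs.length : Int)) :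
    PySem.List.pyGetD (PySem.List.pySetD xs a v) i d = if i = a then v else PySem.List.pyGetD xs i d := by
  rw [PySem.List.pySetD_of_nonneg xs v ha,
      PySem.List.pyGetD_eq_getElem _ d hi (by rw [List.length_set]; exact_mod_cast hi'),
      List.getElem_set]
  by_cases h : i = a
  · rw [if_pos (show a.toNat = i.toNat from by omega), if_pos h]
  · rw [if_neg (show ¬(a.toNat = i.toNat) from by omega), if_neg h,
        PySem.List.pyGetD_eq_getElem xs d hi hi']

lemma Enc_set (n k : Int) (f : Int → Int → Int) (dp : List (List Int)) (a b v : Int)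
    (hn : 0 ≤ n) (hk : 0 ≤ k) (hE : Enc n k f dp)
    (ha : 0 ≤ a) (ha' : a ≤ n) (hb : 0 ≤ b) (hb' : b ≤ k) :
    Enc n k (fun i j => if i = a ∧ j = b then v else f i j)
      (PySem.List.pySetD dp a (PySem.List.pySetD (PySem.List.pyGetD dp a []) b v)) := by
  obtain ⟨hL, hR, hV⟩ := hE
  have hLi : (dp.length : Int) = n + 1 := by omega
  have hrowa : (PySem.List.pyGetD dp a []) ∈ dp := PySem.List.pyGetD_mem dp []
    (show PySem.Raise.InRange dp.length a from ⟨by omega, by omega⟩)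
  have hra := hR _ hrowa
  have hrai : ((PySem.List.pyGetD dp a []).length : Int) = k + 1 := by omega
  refine ⟨?_, ?_, ?_⟩
  · rw [PySem.List.length_pySetD]; exact hL
  · intro row hrow
    rw [PySem.List.pySetD_of_nonneg dp _ ha] at hrow
    rcases List.mem_or_eq_of_mem_set hrow with h | h
    · exact hR _ h
    · rw [h, PySem.List.length_pySetD]; exact hra
  · intro i j h1 h2 h3 h4
    beta_reduce
    rw [pyGetD_pySetD_int dp a i _ [] ha (by omega) h1 (by omega)]
    by_cases hia : i = a
    · rw [if_pos hia,
          pyGetD_pySetD_int (PySem.List.pyGetD dp a []) b j v 0 hb (by omega) h3 (by omega)]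
      by_cases hjb : j = b
      · rw [if_pos hjb, if_pos ⟨by omega, hjb⟩]
      · rw [if_neg hjb, if_neg (by rintro ⟨_, h⟩; exact hjb h), hia]
        exact hV a j (by omega) (by omega) h3 h4
    · rw [if_neg hia, if_neg (by rintro ⟨h, _⟩; exact hia h)]
      exact hV i j h1 h2 h3 h4

lemma Enc_foldl (n k : Int) (l : List Int)
    (fstep : (Int → Int → Int) → Int → (Int → Int → Int))
    (lstep : List (List Int) → Int → List (List Int))
    (f₀ : Int → Int → Int) (dp₀ : List (List Int)) (h₀ : Enc n k f₀ dp₀)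
    (hstep : ∀ f dp x, x ∈ l → Enc n k f dp → Enc n k (fstep f x) (lstep dp x)) :
    Enc n k (l.foldl fstep f₀) (l.foldl lstep dp₀) := by
  induction l generalizing f₀ dp₀ with
  | nil => exact h₀
  | cons x t ih =>
      exact ih _ _ (hstep _ _ x (by simp) h₀)
        (fun f dp y hy hE => hstep f dp y (by simp [hy]) hE)

lemma Enc_init (n k aim : Int) (hn : 2 ≤ n) (hk : 1 ≤ k) (ha : 1 ≤ aim) (ha' : aim ≤ n) :
    Enc n k (fun i j => if i = aim ∧ j = 0 then 1 else 0)
      (PySem.List.pySetD ((PySem.List.pyRange 0 (n + 1) 1).map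
          (fun _ => PySem.List.pyRepeat [(0 : Int)] (k + 1))) aim
        (PySem.List.pySetD (PySem.List.pyGetD ((PySem.List.pyRange 0 (n + 1) 1).map
          (fun _ => PySem.List.pyRepeat [(0 : Int)] (k + 1))) aim []) 0 1)) := by
  have hzero : Enc n k (fun _ _ => 0)
      ((PySem.List.pyRange 0 (n + 1) 1).map (fun _ => PySem.List.pyRepeat [(0 : Int)] (k + 1))) := by
    refine ⟨?_, ?_, ?_⟩
    · rw [List.length_map, PySem.List.length_pyRange_one]; omega
    · intro row hrow
      rcases List.mem_map.1 hrow with ⟨m, _, hmap⟩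
      rw [← hmap, PySem.List.pyRepeat_singleton, List.length_replicate]
    · intro i j h1 h2 h3 h4
      have hlen : (((PySem.List.pyRange 0 (n + 1) 1).map
          (fun _ => PySem.List.pyRepeat [(0 : Int)] (k + 1))).length : Int) = n + 1 := by
        rw [List.length_map, PySem.List.length_pyRange_one]; omega
      rw [PySem.List.pyGetD_eq_getElem _ [] h1 (by omega), List.getElem_map,
          PySem.List.pyRepeat_singleton,
          PySem.List.pyGetD_eq_getElem _ 0 h3 (by
            rw [List.length_replicate]; omega),
          List.getElem_replicate]
  exact Enc_congr n k _ _ _ (by intro i j; beta_reduce; rfl)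
    (Enc_set n k _ _ aim 0 1 (by omega) (by omega) hzero (by omega) (by omega) (by omega) (by omega))

lemma ways3_eq_Wm (n start aim k : Int) (hn : 2 ≤ n) (hs : 1 ≤ start) (hs' : start ≤ n)
    (ha : 1 ≤ aim) (ha' : aim ≤ n) (hk : 1 ≤ k) :
    ways3 n start aim k = Wm n aim k.toNat start := by
  unfold ways3
  rw [if_neg (show ¬(n < 2 ∨ start < 1 ∨ start > n ∨ aim < 1 ∨ aim > n ∨ k < 1) from by omega)]
  dsimp only
  have hEnc : Enc n k
      ((PySem.List.pyRange 1 (k + 1) 1).foldl (fun dp rest =>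
        let dp1 : Int → Int → Int :=
          fun i j => if i = 1 ∧ j = rest then dp 2 (rest - 1) else dp i j
        let dp2 := (PySem.List.pyRange 2 n 1).foldl (fun d cur =>
          fun i j => if i = cur ∧ j = rest then d (cur - 1) (rest - 1) + d (cur + 1) (rest - 1)
                     else d i j) dp1
        fun i j => if i = n ∧ j = rest then dp2 (n - 1) (rest - 1) else dp2 i j)
        (fun i j => if i = aim ∧ j = 0 then 1 else 0))
      ((PySem.List.pyRange 1 (k + 1) 1).foldl (fun dp rest =>
        let dpa := PySem.List.pySetD dp 1 (PySem.List.pySetD (PySem.List.pyGetD dp 1 []) rest (PySem.List.pyGetD (PySem.List.pyGetD dp 2 []) (rest - 1) 0))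
        let dpb := (PySem.List.pyRange 2 n 1).foldl (fun dp cur =>
          PySem.List.pySetD dp cur (PySem.List.pySetD (PySem.List.pyGetD dp cur []) rest
            (PySem.List.pyGetD (PySem.List.pyGetD dp (cur - 1) []) (rest - 1) 0
              + PySem.List.pyGetD (PySem.List.pyGetD dp (cur + 1) []) (rest - 1) 0))) dpa
        PySem.List.pySetD dpb n (PySem.List.pySetD (PySem.List.pyGetD dpb n []) rest (PySem.List.pyGetD (PySem.List.pyGetD dpb (n - 1) []) (rest - 1) 0)))
        (PySem.List.pySetD ((PySem.List.pyRange 0 (n + 1) 1).map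
            (fun _ => PySem.List.pyRepeat [(0 : Int)] (k + 1))) aim
          (PySem.List.pySetD (PySem.List.pyGetD ((PySem.List.pyRange 0 (n + 1) 1).map
            (fun _ => PySem.List.pyRepeat [(0 : Int)] (k + 1))) aim []) 0 1))) := by
    apply Enc_foldl n k _ _ _ _ _ (Enc_init n k aim hn hk ha ha')
    intro f dp rest hrest hE
    have hr := (PySem.List.mem_pyRange_one).1 hrest
    dsimp only
    have hv1 : PySem.List.pyGetD (PySem.List.pyGetD dp 2 []) (rest - 1) 0 = f 2 (rest - 1) :=
      hE.2.2 2 (rest - 1) (by omega) (by omega) (by omega) (by omega)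
    rw [hv1]
    have h1 : Enc n k (fun i j => if i = 1 ∧ j = rest then f 2 (rest - 1) else f i j)
        (PySem.List.pySetD dp 1 (PySem.List.pySetD (PySem.List.pyGetD dp 1 []) rest (f 2 (rest - 1)))) :=
      Enc_set n k f dp 1 rest _ (by omega) (by omega) hE (by omega) (by omega) (by omega) (by omega)
    have h2 : Enc n k
        ((PySem.List.pyRange 2 n 1).foldl (fun d cur =>
          fun i j => if i = cur ∧ j = rest then d (cur - 1) (rest - 1) + d (cur + 1) (rest - 1)
                     else d i j) (fun i j => if i = 1 ∧ j = rest then f 2 (rest - 1) else f i j))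
        ((PySem.List.pyRange 2 n 1).foldl (fun dp cur =>
          PySem.List.pySetD dp cur (PySem.List.pySetD (PySem.List.pyGetD dp cur []) rest
            (PySem.List.pyGetD (PySem.List.pyGetD dp (cur - 1) []) (rest - 1) 0
              + PySem.List.pyGetD (PySem.List.pyGetD dp (cur + 1) []) (rest - 1) 0)))
          (PySem.List.pySetD dp 1 (PySem.List.pySetD (PySem.List.pyGetD dp 1 []) rest (f 2 (rest - 1))))) := by
      apply Enc_foldl n k _ _ _ _ _ h1
      intro g d cur hcur hEg
      have hc := (PySem.List.mem_pyRange_one).1 hcur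
      have hva : PySem.List.pyGetD (PySem.List.pyGetD d (cur - 1) []) (rest - 1) 0 = g (cur - 1) (rest - 1) :=
        hEg.2.2 (cur - 1) (rest - 1) (by omega) (by omega) (by omega) (by omega)
      have hvb : PySem.List.pyGetD (PySem.List.pyGetD d (cur + 1) []) (rest - 1) 0 = g (cur + 1) (rest - 1) :=
        hEg.2.2 (cur + 1) (rest - 1) (by omega) (by omega) (by omega) (by omega)
      rw [hva, hvb]
      exact Enc_set n k g d cur rest _ (by omega) (by omega) hEg (by omega) (by omega)
        (by omega) (by omega)
    have hvn := h2.2.2 (n - 1) (rest - 1) (by omega) (by omega) (by omega) (by omega)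
    rw [hvn]
    exact Enc_set n k _ _ n rest _ (by omega) (by omega) h2 (by omega) (by omega)
      (by omega) (by omega)
  have hfin := hEnc.2.2 start k (by omega) (by omega) (by omega) (by omega)
  rw [hfin]
  rw [show k = ((k.toNat : Nat) : Int) from by omega] at *
  rw [outer_fold n aim hn ha ha' k.toNat]
  unfold Dfun
  rw [if_pos ⟨hs, hs', by omega, le_refl _⟩, Int.toNat_natCast]

-- ===== B-side: the port computes the reflection sum =====

-- cwalk as a binomial coefficient
lemma cwalk_eq_choose : ∀ (r : Nat) (d : Int),
    cwalk r d = if (d + (r : Int)) % 2 = 0 ∧ -(r : Int) ≤ d ∧ d ≤ (r : Int)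
      then ((r.choose ((d + (r : Int)) / 2).toNat : Nat) : Int) else 0 := by
  intro r
  induction r with
  | zero =>
      intro d
      simp only [cwalk, Nat.cast_zero, add_zero, neg_zero]
      by_cases hd : d = 0
      · subst hd; norm_num
      · rw [if_neg hd, if_neg (by rintro ⟨h1, h2, h3⟩; omega)]
  | succ r ih =>
      intro d
      simp only [cwalk, ih]
      push_cast
      by_cases hp : (d + ((r : Int) + 1)) % 2 = 0
      · by_cases hlo : -((r : Int) + 1) ≤ d
        · by_cases hhi : d ≤ (r : Int) + 1
          · by_cases hd : d = -((r : Int) + 1)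
            · rw [if_neg (show ¬((d - 1 + (r : Int)) % 2 = 0 ∧ -(r : Int) ≤ d - 1 ∧ d - 1 ≤ (r : Int))
                    from by rintro ⟨_, h, _⟩; omega),
                  if_pos (show (d + 1 + (r : Int)) % 2 = 0 ∧ -(r : Int) ≤ d + 1 ∧ d + 1 ≤ (r : Int)
                    from by omega),
                  if_pos (show (d + ((r : Int) + 1)) % 2 = 0 ∧ -((r : Int) + 1) ≤ d ∧ d ≤ (r : Int) + 1
                    from by omega),
                  show ((d + 1 + (r : Int)) / 2).toNat = 0 from by omega,
                  show ((d + ((r : Int) + 1)) / 2).toNat = 0 from by omega]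
              norm_num
            · obtain ⟨jn, hj⟩ : ∃ jn : Nat, (jn : Int) + 1 = (d + ((r : Int) + 1)) / 2 :=
                ⟨((d + ((r : Int) + 1)) / 2 - 1).toNat, by omega⟩
              rw [if_pos (show (d - 1 + (r : Int)) % 2 = 0 ∧ -(r : Int) ≤ d - 1 ∧ d - 1 ≤ (r : Int)
                    from by omega),
                  if_pos (show (d + ((r : Int) + 1)) % 2 = 0 ∧ -((r : Int) + 1) ≤ d ∧ d ≤ (r : Int) + 1
                    from by omega),
                  show ((d - 1 + (r : Int)) / 2).toNat = jn from by omega,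
                  show ((d + ((r : Int) + 1)) / 2).toNat = jn + 1 from by omega]
              by_cases hup : d + 1 ≤ (r : Int)
              · rw [if_pos (show (d + 1 + (r : Int)) % 2 = 0 ∧ -(r : Int) ≤ d + 1 ∧ d + 1 ≤ (r : Int)
                      from by omega),
                    show ((d + 1 + (r : Int)) / 2).toNat = jn + 1 from by omega,
                    Nat.choose_succ_succ]
                push_cast
                ring
              · rw [if_neg (show ¬((d + 1 + (r : Int)) % 2 = 0 ∧ -(r : Int) ≤ d + 1 ∧ d + 1 ≤ (r : Int))
                      from by rintro ⟨_, _, h⟩; omega)]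
                have hjr : jn = r := by omega
                subst hjr
                norm_num [Nat.choose_self]
          · rw [if_neg (by rintro ⟨_, _, h⟩; omega), if_neg (by rintro ⟨_, _, h⟩; omega),
                if_neg (by rintro ⟨_, _, h⟩; omega)]
            ring
        · rw [if_neg (by rintro ⟨_, h, _⟩; omega), if_neg (by rintro ⟨_, h, _⟩; omega),
              if_neg (by rintro ⟨_, h, _⟩; omega)]
          ring
      · rw [if_neg (by rintro ⟨h, _, _⟩; omega), if_neg (by rintro ⟨h, _, _⟩; omega),
            if_neg (by rintro ⟨h, _, _⟩; omega)]
        ring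

-- the factorial-table loop of B
lemma fact_fold : ∀ v : Nat,
    (PySem.List.pyRange 1 ((v : Int) + 1) 1).foldl
      (fun f i => fun j => if j = i then f (i - 1) * i else f j) (fun _ => 1)
    = fun j : Int => if 0 ≤ j ∧ j ≤ (v : Int) then ((j.toNat.factorial : Nat) : Int) else 1 := by
  intro v
  induction v with
  | zero =>
      rw [show ((0 : Nat) : Int) + 1 = 1 from by norm_num,
          PySem.List.pyRange_one_eq_nil (a := 1) (b := 1) (by norm_num)]
      funext j
      simp only [List.foldl_nil, Nat.cast_zero]
      by_cases hj : 0 ≤ j ∧ j ≤ (0 : Int)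
      · rw [if_pos hj, show j = 0 from by omega]
        norm_num [Nat.factorial]
      · rw [if_neg hj]
  | succ v ih =>
      rw [show ((v + 1 : Nat) : Int) = (v : Int) + 1 from by push_cast; ring,
          PySem.List.pyRange_one_succ_right (a := 1) (b := (v : Int) + 1) (by omega),
          List.foldl_append, List.foldl_cons, List.foldl_nil, ih]
      funext j
      beta_reduce
      have hv0 : (0 : Int) ≤ (v : Int) := Int.natCast_nonneg v
      by_cases hj : j = (v : Int) + 1
      · rw [if_pos hj, show (v : Int) + 1 - 1 = (v : Int) from by ring,
            if_pos (show 0 ≤ (v : Int) ∧ (v : Int) ≤ (v : Int) from by omega),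
            if_pos (show 0 ≤ j ∧ j ≤ (v : Int) + 1 from by omega),
            Int.toNat_natCast, hj, show ((v : Int) + 1).toNat = v + 1 from by omega,
            Nat.factorial_succ]
        push_cast
        ring
      · rw [if_neg hj]
        by_cases hc : 0 ≤ j ∧ j ≤ (v : Int)
        · rw [if_pos hc, if_pos (show 0 ≤ j ∧ j ≤ (v : Int) + 1 from by omega)]
        · rw [if_neg hc, if_neg (show ¬(0 ≤ j ∧ j ≤ (v : Int) + 1) from by
              rintro ⟨u, w⟩; exact hc ⟨u, by omega⟩)]

-- B's comb computes cwalk (with the factorial table given pointwise)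
lemma comb_eq_cwalk (K : Nat) (fact : Int → Int)
    (hfact : ∀ j : Int, fact j = if 0 ≤ j ∧ j ≤ (K : Int) then ((j.toNat.factorial : Nat) : Int) else 1)
    (d : Int) :
    (if PySem.Int.mod (d + (K : Int)) 2 ≠ 0 ∨ d + (K : Int) < 0 ∨ d + (K : Int) > 2 * (K : Int) then (0 : Int)
     else PySem.Int.floordiv (fact (K : Int))
            (fact (PySem.Int.floordiv (d + (K : Int)) 2)
              * fact ((K : Int) - PySem.Int.floordiv (d + (K : Int)) 2)))
      = cwalk K d := by
  rw [cwalk_eq_choose K d]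
  simp only [PySem.Int.mod_eq_emod_of_pos (show (0 : Int) < 2 from by norm_num),
             PySem.Int.floordiv_eq_ediv_of_pos (show (0 : Int) < 2 from by norm_num)]
  by_cases hg : (d + (K : Int)) % 2 ≠ 0 ∨ d + (K : Int) < 0 ∨ d + (K : Int) > 2 * (K : Int)
  · rw [if_pos hg, if_neg (by omega)]
  · rw [if_neg hg]
    set j := (d + (K : Int)) / 2 with hjdef
    have hj0 : 0 ≤ j := by omega
    have hjK : j ≤ (K : Int) := by omega
    rw [hfact, hfact, hfact,
        if_pos (show 0 ≤ (K : Int) ∧ (K : Int) ≤ (K : Int) from by omega),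
        if_pos (show 0 ≤ j ∧ j ≤ (K : Int) from ⟨hj0, hjK⟩),
        if_pos (show 0 ≤ (K : Int) - j ∧ (K : Int) - j ≤ (K : Int) from by omega),
        if_pos (show (d + (K : Int)) % 2 = 0 ∧ -(K : Int) ≤ d ∧ d ≤ (K : Int) from by omega),
        Int.toNat_natCast, show ((K : Int) - j).toNat = K - j.toNat from by omega]
    have hjle : j.toNat ≤ K := by omega
    have hfac := Nat.choose_mul_factorial_mul_factorial hjle
    have hpos : (0 : Int) < (j.toNat.factorial : Int) * ((K - j.toNat).factorial : Int) := by
      exact_mod_cast Nat.mul_pos (Nat.factorial_pos _) (Nat.factorial_pos _)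
    rw [PySem.Int.floordiv_eq_ediv_of_pos hpos, ← hfac]
    push_cast
    rw [mul_assoc]
    exact Int.mul_ediv_cancel _ (ne_of_gt hpos)

lemma ways3_alt_eq_reflSum (n start aim k : Int) (hn : 2 ≤ n) (hs : 1 ≤ start) (hs' : start ≤ n)
    (ha : 1 ≤ aim) (ha' : aim ≤ n) (hk : 1 ≤ k) :
    ways3_alt n start aim k
      = reflSum n aim k.toNat start (-(PySem.Int.floordiv k (n + 1) + 1)) (PySem.Int.floordiv k (n + 1) + 1) := by
  unfold ways3_alt
  rw [if_neg (show ¬(n < 2 ∨ start < 1 ∨ start > n ∨ aim < 1 ∨ aim > n ∨ k < 1) from by omega)]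
  dsimp only
  rw [show k = ((k.toNat : Nat) : Int) from by omega]
  simp only [Int.toNat_natCast]
  rw [fact_fold k.toNat, PySem.List.foldl_add, zero_add]
  unfold reflSum
  apply congrArg
  apply List.map_congr_left
  intro m hm
  rw [comb_eq_cwalk k.toNat _ (fun j => rfl) (aim - start + 2 * m * (n + 1)),
      comb_eq_cwalk k.toNat _ (fun j => rfl) (aim + start + 2 * m * (n + 1))]

-- ===== VERDICT (by name: the statement is the Claim_ definition above) =====
theorem ways3_spec : Claim_equal_ways3 := by
  intro n start aim k _
  unfold Spec_ways3
  by_cases hg : n < 2 ∨ start < 1 ∨ start > n ∨ aim < 1 ∨ aim > n ∨ k < 1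
  · simp only [ways3, ways3_alt, if_pos hg]
  · rw [ways3_eq_Wm n start aim k (by omega) (by omega) (by omega) (by omega) (by omega) (by omega),
        ways3_alt_eq_reflSum n start aim k (by omega) (by omega) (by omega) (by omega) (by omega) (by omega),
        Wm_eq_reflSum n aim (by omega) (by omega) (by omega) k.toNat start (by omega) (by omega)]
    have hkc : ((k.toNat : Nat) : Int) = k := Int.toNat_of_nonneg (by omega)
    rw [hkc]
    have hdm := PySem.Int.floordiv_mul_add_mod k (n + 1)
    have hm0 := PySem.Int.mod_nonneg k (show (0 : Int) < n + 1 from by omega)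
    have hm1 := PySem.Int.mod_lt k (show (0 : Int) < n + 1 from by omega)
    have hq0 : 0 ≤ PySem.Int.floordiv k (n + 1) := by nlinarith
    have hcov_t : ((k.toNat : Nat) : Int) ≤ 2 * (n + 1) * (PySem.Int.floordiv k (n + 1) + 1) := by
      rw [hkc]; nlinarith
    have hcov_c : ((k.toNat : Nat) : Int) ≤ 2 * (n + 1) * (k + 2) := by
      rw [hkc]; nlinarith
    calc reflSum n aim k.toNat start (-(k + 2)) (k + 2)
        = reflSum n aim k.toNat start (-((k + 2) + (PySem.Int.floordiv k (n + 1) + 1)))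
            ((k + 2) + (PySem.Int.floordiv k (n + 1) + 1)) :=
          (reflSum_extend n aim k.toNat start (k + 2) ((k + 2) + (PySem.Int.floordiv k (n + 1) + 1))
            (by omega) (by omega) (by omega) (by omega) (by omega) hcov_c (by omega) (by omega)).symm
      _ = reflSum n aim k.toNat start (-(PySem.Int.floordiv k (n + 1) + 1))
            (PySem.Int.floordiv k (n + 1) + 1) :=
          reflSum_extend n aim k.toNat start (PySem.Int.floordiv k (n + 1) + 1)
            ((k + 2) + (PySem.Int.floordiv k (n + 1) + 1))
            (by omega) (by omega) (by omega) (by omega) (by omega) hcov_t (by omega) (by omega)
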